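-- pv_equiv track=rewrite | github.com/shilad/mira-feedback | mira/evidence/models.py | clamp_snippets
-- ===== SOURCE A (Python) =====
-- from typing import Dict, Iterable, List, Optional
--
-- def clamp_snippets(snippets: Iterable[str], max_total_bytes: int) -> List[str]:
--     """Ensure combined snippet size stays within policy budget."""
--     result: List[str] = []
--     running = 0
--     for snippet in snippets:
--         encoded = snippet.encode("utf-8", errors="ignore")
--         if running + len(encoded) > max_total_bytes:
--             break
--         result.append(snippet)
--         running += len(encoded)
--     return result
-- ===== SOURCE B (Python) =====
-- def clamp_snippets(snippets, max_total_bytes):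
--     """Cumulative-sum table + binary search for the cutoff.
--
--     Since byte lengths are nonnegative, the cumulative totals are
--     nondecreasing, so the kept prefix is exactly the cumulative sums
--     that are <= max_total_bytes; find its end by bisection.
--     """
--     items = list(snippets)
--     cums = []
--     total = 0
--     for s in items:
--         total += len(s.encode("utf-8", errors="ignore"))
--         cums.append(total)
--     lo, hi = 0, len(cums)
--     while lo < hi:
--         mid = (lo + hi) // 2
--         if cums[mid] <= max_total_bytes:
--             lo = mid + 1
--         else:
--             hi = mid
--     return items[:lo]
-- ===== Notes on version B (the rewrite author's own statement) =====
-- stated objective: alternative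
-- what changed: B builds the table of cumulative byte totals and then binary-searches it for the cutoff index (correct because the totals are nondecreasing, so the within-budget prefix is contiguous), instead of A's single greedy accumulate-and-break loop.
import Mathlib
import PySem

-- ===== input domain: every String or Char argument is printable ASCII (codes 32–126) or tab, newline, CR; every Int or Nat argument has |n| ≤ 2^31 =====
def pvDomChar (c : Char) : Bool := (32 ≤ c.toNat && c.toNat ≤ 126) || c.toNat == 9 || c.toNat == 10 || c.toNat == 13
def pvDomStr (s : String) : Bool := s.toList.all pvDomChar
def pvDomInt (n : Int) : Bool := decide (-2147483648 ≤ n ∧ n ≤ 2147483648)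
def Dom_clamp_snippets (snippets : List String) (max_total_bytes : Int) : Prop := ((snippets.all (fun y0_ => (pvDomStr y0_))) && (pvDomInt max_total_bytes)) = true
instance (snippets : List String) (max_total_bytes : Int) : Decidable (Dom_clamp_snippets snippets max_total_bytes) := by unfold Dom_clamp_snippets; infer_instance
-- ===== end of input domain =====

-- B replaces A's greedy accumulate-and-break loop by a cumulative-sum table plus a
-- binary search for the cutoff index (valid because the totals are nondecreasing).
-- (On the ASCII domain Dom_, len(s.encode("utf-8", errors="ignore")) = number of chars,
-- so both ports measure a snippet's byte length as s.toList.length — exact on Dom_.)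
-- ===== PORT A =====
def clampA_loop (m : Int) : List String → Int → List String
  | [], _ => []
  | s :: rest, running =>
    let encLen : Int := (s.toList.length : Int)
    if running + encLen > m then []
    else s :: clampA_loop m rest (running + encLen)

def clamp_snippets (snippets : List String) (max_total_bytes : Int) : List String :=
  clampA_loop max_total_bytes snippets 0

-- ===== PORT B =====
-- the cumulative byte-total table (B's first loop)
def cumsB : List String → Int → List Int
  | [], _ => []
  | s :: rest, total =>
    let t := total + (s.toList.length : Int)
    t :: cumsB rest t

-- B's while-loop: binary search for the first cumulative total exceeding m
def bsearchB (cs : List Int) (m : Int) (lo hi : Nat) : Nat :=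
  if lo < hi then
    if cs.getD ((lo + hi) / 2) 0 ≤ m then bsearchB cs m ((lo + hi) / 2 + 1) hi
    else bsearchB cs m lo ((lo + hi) / 2)
  else lo
termination_by hi - lo
decreasing_by all_goals omega

def clamp_snippets_alt (snippets : List String) (max_total_bytes : Int) : List String :=
  let cs := cumsB snippets 0
  snippets.take (bsearchB cs max_total_bytes 0 cs.length)

-- ===== PRECONDITION & SPEC =====
def Spec_clamp_snippets (snippets : List String) (max_total_bytes : Int) (out : List String) : Prop := out = clamp_snippets_alt snippets max_total_bytes
instance (snippets : List String) (max_total_bytes : Int) (out : List String) : Decidable (Spec_clamp_snippets snippets max_total_bytes out) := by unfold Spec_clamp_snippets; infer_instance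

-- ===== CLAIM (what is proved, stated in full; the proofs are below) =====
def Claim_equal_clamp_snippets : Prop := ∀ (snippets : List String) (max_total_bytes : Int), Dom_clamp_snippets snippets max_total_bytes → Spec_clamp_snippets snippets max_total_bytes (clamp_snippets snippets max_total_bytes)

-- ===== LEMMAS AND PROOFS =====

-- every cumulative total is at least the starting total
theorem cumsB_ge (xs : List String) (r : Int) : ∀ b ∈ cumsB xs r, r ≤ b := by
  induction xs generalizing r with
  | nil => simp [cumsB]
  | cons s rest ih =>
    intro b hb
    simp only [cumsB, List.mem_cons] at hb
    rcases hb with h | h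
    · omega
    · have := ih (r + (s.toList.length : Int)) b h
      omega

-- A's loop returns the take at the takeWhile-cutoff of the cumulative table
theorem clampA_eq_takeWhile (m : Int) (xs : List String) (r : Int) :
    clampA_loop m xs r =
      xs.take ((cumsB xs r).takeWhile (fun t => decide (t ≤ m))).length := by
  induction xs generalizing r with
  | nil => simp [clampA_loop, cumsB]
  | cons s rest ih =>
    simp only [clampA_loop, cumsB, List.takeWhile]
    by_cases h : r + (s.length : Int) ≤ m
    · simp [h, ih, List.take_succ_cons]
    · simp [h]

-- the takeWhile-cutoff splits the table: ≤ m before it, > m from it on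
theorem cutoff_spec (m : Int) (cs : List Int) (hmono : cs.Pairwise (· ≤ ·)) :
    ∀ i < cs.length,
      (cs.getD i 0 ≤ m ↔ i < (cs.takeWhile (fun t => decide (t ≤ m))).length) := by
  induction cs with
  | nil => simp
  | cons a rest ih =>
    have hle : ∀ b ∈ rest, a ≤ b := (List.pairwise_cons.mp hmono).1
    have hmono' := (List.pairwise_cons.mp hmono).2
    intro i hi
    by_cases ha : a ≤ m
    · simp only [List.takeWhile, ha, decide_true, List.length_cons]
      cases i with
      | zero => simpa using ha
      | succ j =>
        have hj : j < rest.length := by simpa using hi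
        simpa [List.getD_cons_succ, Nat.succ_lt_succ_iff] using ih hmono' j hj
    · simp only [List.takeWhile, ha, decide_false, List.length_nil]
      cases i with
      | zero => simpa using ha
      | succ j =>
        have hj : j < rest.length := by simpa using hi
        have hmem : rest.getD j 0 ∈ rest := by
          rw [List.getD_eq_getElem rest 0 hj]; exact List.getElem_mem hj
        have := hle _ hmem
        simp only [List.getD_cons_succ]
        omega

-- binary search finds exactly the cutoff c
theorem bsearchB_eq (cs : List Int) (m : Int) (c : Nat)
    (hspec : ∀ i < cs.length, (cs.getD i 0 ≤ m ↔ i < c)) :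
    ∀ k lo hi, hi - lo ≤ k → lo ≤ c → c ≤ hi → hi ≤ cs.length →
      bsearchB cs m lo hi = c := by
  intro k
  induction k with
  | zero =>
    intro lo hi hk hlo hhi hlen
    rw [bsearchB]
    have : ¬ lo < hi := by omega
    simp only [this, if_false]
    omega
  | succ n ih =>
    intro lo hi hk hlo hhi hlen
    rw [bsearchB]
    by_cases h : lo < hi
    · simp only [h, if_true]
      have hmid : (lo + hi) / 2 < cs.length := by omega
      have hiff := hspec ((lo + hi) / 2) hmid
      by_cases hle : cs.getD ((lo + hi) / 2) 0 ≤ m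
      · have : (lo + hi) / 2 < c := hiff.mp hle
        simp only [hle, if_true]
        exact ih _ _ (by omega) (by omega) hhi hlen
      · have : ¬ (lo + hi) / 2 < c := fun hlt => hle (hiff.mpr hlt)
        simp only [hle, if_false]
        exact ih _ _ (by omega) hlo (by omega) (by omega)
    · simp only [h, if_false]; omega

-- the cumulative table is nondecreasing (byte lengths are nonnegative)
theorem cumsB_pairwise (xs : List String) (r : Int) : (cumsB xs r).Pairwise (· ≤ ·) := by
  induction xs generalizing r with
  | nil => simp [cumsB]
  | cons s rest ih =>
    simp only [cumsB]
    refine List.pairwise_cons.mpr ⟨?_, ih _⟩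
    intro b hb
    exact cumsB_ge rest _ b hb

-- ===== VERDICT (by name: the statement is the Claim_ definition above) =====
theorem clamp_snippets_spec : Claim_equal_clamp_snippets := by
  intro snippets m _
  unfold Spec_clamp_snippets clamp_snippets clamp_snippets_alt
  set cs := cumsB snippets 0 with hcs
  set c := (cs.takeWhile (fun t => decide (t ≤ m))).length with hc
  have hclen : c ≤ cs.length := by
    rw [hc]; exact (List.takeWhile_prefix _).length_le
  have hb : bsearchB cs m 0 cs.length = c :=
    bsearchB_eq cs m c (cutoff_spec m cs (cumsB_pairwise snippets 0))
      cs.length 0 cs.length (by omega) (by omega) hclen (le_refl _)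
  show clampA_loop m snippets 0 = snippets.take (bsearchB cs m 0 cs.length)
  rw [hb, hc, hcs]
  exact clampA_eq_takeWhile m snippets 0
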